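/- GENERATED by farm/mkstatement.py from design/units.split.tsv — do not edit.
   THE SPLIT of the proof unit `start_decoder.R16` into `start_decoder.R16a`, `start_decoder.R16b`, `start_decoder.R16c`, `start_decoder.R16d`, `start_decoder.R16e`: the children's statements give the parent's
   UNCHANGED statement (so nothing above the parent — callers, compositions — is touched by the split). -/
import Vorbis.Spec.StartDecoderR16
import Vorbis.Spec.Units.start_decoder_R16
import Vorbis.Spec.Units.start_decoder_R16a
import Vorbis.Spec.Units.start_decoder_R16b
import Vorbis.Spec.Units.start_decoder_R16c
import Vorbis.Spec.Units.start_decoder_R16d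
import Vorbis.Spec.Units.start_decoder_R16e
namespace Vorbis.Spec.Splits
open X86 X86.User Asan

/-- The children of the split unit `start_decoder.R16` prove it, by `Vorbis.Spec.StartDecoder.SegR16.of_parts`. -/
theorem start_decoder_R16
    (h_start_decoder_R16a : Vorbis.Spec.start_decoder_R16a.Statement)
    (h_start_decoder_R16b : Vorbis.Spec.start_decoder_R16b.Statement)
    (h_start_decoder_R16c : Vorbis.Spec.start_decoder_R16c.Statement)
    (h_start_decoder_R16d : Vorbis.Spec.start_decoder_R16d.Statement)
    (h_start_decoder_R16e : Vorbis.Spec.start_decoder_R16e.Statement) :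
    Vorbis.Spec.start_decoder_R16.Statement := by
  intro Lay _hLay μ _hμ u₀ _hcode _h_asan_load4_noabort _h_setup_malloc _h_asan_store8_noabort _h_asan_load8_noabort _h_error _h_memset
  apply Vorbis.Spec.StartDecoder.SegR16.of_parts
  · exact h_start_decoder_R16a Lay _hLay μ _hμ u₀ _hcode _h_asan_load4_noabort _h_setup_malloc
  · exact h_start_decoder_R16b Lay _hLay μ _hμ u₀ _hcode _h_asan_load4_noabort _h_setup_malloc _h_asan_store8_noabort
  · exact h_start_decoder_R16c Lay _hLay μ _hμ u₀ _hcode _h_setup_malloc _h_asan_store8_noabort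
  · exact h_start_decoder_R16d Lay _hLay μ _hμ u₀ _hcode _h_asan_load4_noabort _h_asan_store8_noabort _h_asan_load8_noabort _h_error _h_memset
  · exact h_start_decoder_R16e Lay _hLay μ _hμ u₀ _hcode

end Vorbis.Spec.Splits
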